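-- pv_equiv track=rewrite | github.com/atuSpirit/DataAnalysis | bioinformatics/cutProteinsByEnzyme.py | cutByPattern
-- ===== SOURCE A (Python) =====
-- def cutByPattern(protein, patternList, excludePattern):
--     """ Cut protein by characters in patternList if they are not followed
--     by excludePattern. For trypsin, patternList is [K, R], excludePattern is P.
--     For LysC, patternList is K, excludePattern is ''. """
--     peptideList = []
--     peptide = ''
--     for index in range(len(protein)):
--         flag = False
--         peptide += protein[index]
--
--         for pattern in patternList:
--             if (protein[index] == pattern):
--                 if index < (len(protein) - 1):
--                     if protein[index + 1] != excludePattern: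
--                         flag = True
--                         break
--                 else:
--                     flag = True
--                     break
--
--         if (flag and len(peptide) > 0):
--             peptideList.append(peptide)
--             peptide = ''
--     if len(peptide) > 0:
--         peptideList.append(peptide)
--
--     return peptideList
-- ===== SOURCE B (Python) =====
-- def cutByPattern(protein, patternList, excludePattern):
--     """ Cut protein by characters in patternList if they are not followed
--     by excludePattern. """
--     n = len(protein)
--     cuts = [i for i in range(n)
--             if protein[i] in patternList
--             and (i == n - 1 or protein[i + 1] != excludePattern)]
--     peptideList = []
--     start = 0
--     for c in cuts:
--         peptideList.append(protein[start:c + 1])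
--         start = c + 1
--     if start < n:
--         peptideList.append(protein[start:])
--     return peptideList
-- ===== Notes on version B (the rewrite author's own statement) =====
-- stated objective: alternative
-- what changed: B first collects all cut indices in one comprehension, then builds the peptides by slicing the protein between consecutive cut positions, replacing A's char-by-char buffer accumulation with flag/reset logic.
import Mathlib
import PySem

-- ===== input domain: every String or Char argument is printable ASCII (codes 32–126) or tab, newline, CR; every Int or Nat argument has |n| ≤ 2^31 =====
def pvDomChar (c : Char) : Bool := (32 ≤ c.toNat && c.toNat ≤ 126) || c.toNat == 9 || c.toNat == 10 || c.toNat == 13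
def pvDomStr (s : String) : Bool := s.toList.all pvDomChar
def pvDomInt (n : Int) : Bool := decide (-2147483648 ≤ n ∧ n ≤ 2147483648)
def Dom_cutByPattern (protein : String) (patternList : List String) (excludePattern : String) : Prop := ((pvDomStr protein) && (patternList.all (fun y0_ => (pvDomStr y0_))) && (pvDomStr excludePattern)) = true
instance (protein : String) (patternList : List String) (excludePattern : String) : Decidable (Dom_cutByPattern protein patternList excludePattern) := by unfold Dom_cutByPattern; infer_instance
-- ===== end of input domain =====

-- B replaces A's char-by-char buffer accumulation (flag + reset) by a one-pass cut-index
-- table followed by slicing between consecutive cuts (alternative decomposition, same cost).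

-- ===== PORT A =====
-- inner 'for pattern in patternList' loop with its break (next? = protein[index+1] if any)
def pvFlagA (c : Char) (next? : Option Char) (ex : String) : List String → Bool
  | [] => false
  | p :: ps =>
    if String.mk [c] = p then
      match next? with
      | some nx => if String.mk [nx] ≠ ex then true else pvFlagA c next? ex ps
      | none => true
    else pvFlagA c next? ex ps

-- the main 'for index in range(len(protein))' loop; acc is the running 'peptide' buffer
def pvGoA (pl : List String) (ex : String) (acc : List Char) : List Char → List String
  | [] => if acc.length > 0 then [String.mk acc] else []
  | c :: rest =>
    let peptide := acc ++ [c]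
    if pvFlagA c rest.head? ex pl && decide (peptide.length > 0) then
      String.mk peptide :: pvGoA pl ex [] rest
    else
      pvGoA pl ex peptide rest

def cutByPattern (protein : String) (patternList : List String) (excludePattern : String) : List String :=
  pvGoA patternList excludePattern [] protein.toList

-- ===== PORT B =====
-- protein[a:b] for 0 ≤ a ≤ b ≤ len(protein) (exact on those bounds, the only ones B uses)
def pvSeg (cs : List Char) (a b : Nat) : List Char := (cs.drop a).take (b - a)

-- the comprehension's condition: protein[i] in patternList and (i == n-1 or protein[i+1] != excludePattern)
def pvIsCut (pl : List String) (ex : String) (cs : List Char) (i : Nat) : Bool :=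
  decide (String.mk [cs.getD i ' '] ∈ pl) &&
    (decide (i = cs.length - 1) || decide (String.mk [cs.getD (i + 1) ' '] ≠ ex))

def cutByPattern_alt (protein : String) (patternList : List String) (excludePattern : String) : List String :=
  let cs := protein.toList
  let n := cs.length
  let cuts := (List.range n).filter (pvIsCut patternList excludePattern cs)
  let st := cuts.foldl
    (fun (st : Nat × List String) c => (c + 1, st.2 ++ [String.mk (pvSeg cs st.1 (c + 1))])) (0, [])
  if st.1 < n then st.2 ++ [String.mk (cs.drop st.1)] else st.2

-- ===== PRECONDITION & SPEC =====
def Spec_cutByPattern (protein : String) (patternList : List String) (excludePattern : String) (out : List String) : Prop := out = cutByPattern_alt protein patternList excludePattern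
instance (protein : String) (patternList : List String) (excludePattern : String) (out : List String) : Decidable (Spec_cutByPattern protein patternList excludePattern out) := by unfold Spec_cutByPattern; infer_instance

-- ===== CLAIM (what is proved, stated in full; the proofs are below) =====
def Claim_equal_cutByPattern : Prop := ∀ (protein : String) (patternList : List String) (excludePattern : String), Dom_cutByPattern protein patternList excludePattern → Spec_cutByPattern protein patternList excludePattern (cutByPattern protein patternList excludePattern)

-- ===== LEMMAS AND PROOFS =====

-- the cut condition as a function of the current char and the lookahead
def pvCutP (pl : List String) (ex : String) (c : Char) (next? : Option Char) : Bool :=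
  decide (String.mk [c] ∈ pl) &&
    (match next? with | none => true | some nx => decide (String.mk [nx] ≠ ex))

theorem pvFlagA_eq (c : Char) (next? : Option Char) (ex : String) (pl : List String) :
    pvFlagA c next? ex pl = pvCutP pl ex c next? := by
  induction pl with
  | nil => simp [pvFlagA, pvCutP]
  | cons p ps ih =>
    simp only [pvFlagA, pvCutP]
    by_cases h : String.mk [c] = p
    · cases next? with
      | none => simp [h]
      | some nx =>
        by_cases hx : String.mk [nx] = ex
        · simp [h, hx, ih, pvCutP]
        · simp [h, hx]
    · simp [h, ih, pvCutP]

-- A's loop with the flag expressed through pvCutP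
def pvGroups (pl : List String) (ex : String) (acc : List Char) : List Char → List (List Char)
  | [] => if acc.length > 0 then [acc] else []
  | c :: rest =>
    if pvCutP pl ex c rest.head? then (acc ++ [c]) :: pvGroups pl ex [] rest
    else pvGroups pl ex (acc ++ [c]) rest

theorem pvGoA_eq_groups (pl : List String) (ex : String) (cs acc : List Char) :
    pvGoA pl ex acc cs = (pvGroups pl ex acc cs).map String.mk := by
  induction cs generalizing acc with
  | nil => simp only [pvGoA, pvGroups]; split <;> simp
  | cons c rest ih =>
    simp only [pvGoA, pvGroups, pvFlagA_eq]
    by_cases h : pvCutP pl ex c rest.head? = true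
    · simp [h, ih]
    · simp [h, ih]

-- recursive form of B's slicing fold
def pvChop (cs : List Char) : List Nat → Nat → List (List Char)
  | [], s => if s < cs.length then [cs.drop s] else []
  | k :: rest, s => pvSeg cs s (k + 1) :: pvChop cs rest (k + 1)

theorem pvFold_eq_chop (cs : List Char) (cuts : List Nat) :
    ∀ (s : Nat) (out : List String),
    (let st := cuts.foldl
        (fun (st : Nat × List String) c => (c + 1, st.2 ++ [String.mk (pvSeg cs st.1 (c + 1))])) (s, out)
     if st.1 < cs.length then st.2 ++ [String.mk (cs.drop st.1)] else st.2)
    = out ++ (pvChop cs cuts s).map String.mk := by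
  induction cuts with
  | nil => intro s out; simp only [List.foldl_nil, pvChop]; split <;> simp
  | cons k rest ih =>
    intro s out
    simp only [List.foldl_cons, pvChop, List.map_cons]
    rw [ih (k + 1) (out ++ [String.mk (pvSeg cs s (k + 1))])]
    simp

-- shifting a chop past a prefix
theorem pvChop_shift (pre cs : List Char) (cuts : List Nat) :
    ∀ s : Nat, pvChop (pre ++ cs) (cuts.map (· + pre.length)) (s + pre.length) = pvChop cs cuts s := by
  induction cuts with
  | nil =>
    intro s
    simp only [List.map_nil, pvChop, List.length_append]
    have hd : (pre ++ cs).drop (s + pre.length) = cs.drop s := by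
      rw [Nat.add_comm, List.drop_append, List.drop_eq_nil_of_le (by omega)]
      simp
    rw [hd]
    by_cases h : s < cs.length
    · rw [if_pos h, if_pos (by omega)]
    · rw [if_neg h, if_neg (by omega)]
  | cons k rest ih =>
    intro s
    simp only [List.map_cons, pvChop]
    have hseg : pvSeg (pre ++ cs) (s + pre.length) (k + pre.length + 1) = pvSeg cs s (k + 1) := by
      unfold pvSeg
      rw [Nat.add_comm s pre.length, List.drop_append, List.drop_eq_nil_of_le (by omega),
        Nat.add_sub_cancel_left, List.nil_append]
      congr 1
      omega
    rw [hseg]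
    have : k + pre.length + 1 = (k + 1) + pre.length := by omega
    rw [this, ih (k + 1)]

-- pvIsCut on a cons, position 0
theorem pvIsCut_zero (pl : List String) (ex : String) (c : Char) (cs : List Char) :
    pvIsCut pl ex (c :: cs) 0 = pvCutP pl ex c cs.head? := by
  cases cs with
  | nil => simp [pvIsCut, pvCutP]
  | cons d t => simp [pvIsCut, pvCutP]

-- pvIsCut on a cons, successor position (within range)
theorem pvIsCut_succ (pl : List String) (ex : String) (c : Char) (cs : List Char) (i : Nat)
    (hi : i < cs.length) : pvIsCut pl ex (c :: cs) (i + 1) = pvIsCut pl ex cs i := by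
  simp only [pvIsCut, List.getD_cons_succ, List.length_cons]
  congr 2
  simp only [decide_eq_decide]
  omega

theorem pvCuts_cons (pl : List String) (ex : String) (c : Char) (cs : List Char) :
    (List.range (c :: cs).length).filter (pvIsCut pl ex (c :: cs))
    = (if pvCutP pl ex c cs.head? then [0] else [])
      ++ ((List.range cs.length).filter (pvIsCut pl ex cs)).map (· + 1) := by
  have h1 : (List.range (cs.length + 1)) = 0 :: (List.range cs.length).map (· + 1) := by
    rw [List.range_succ_eq_map]
  simp only [List.length_cons, h1, List.filter_cons, pvIsCut_zero]
  rw [List.filter_map]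
  have hXY : (List.range cs.length).filter (pvIsCut pl ex (c :: cs) ∘ (fun x => x + 1))
      = (List.range cs.length).filter (pvIsCut pl ex cs) := by
    apply List.filter_congr
    intro i hi
    simp only [Function.comp_apply]
    exact pvIsCut_succ pl ex c cs i (List.mem_range.mp hi)
  rw [hXY]
  split <;> simp

-- the crux: A's grouping equals B's chop over the collected cut indices
theorem pvGroups_eq_chop (pl : List String) (ex : String) :
    ∀ (cs acc : List Char),
    pvGroups pl ex acc cs
    = pvChop (acc ++ cs) (((List.range cs.length).filter (pvIsCut pl ex cs)).map (· + acc.length)) 0 := by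
  intro cs
  induction cs with
  | nil =>
    intro acc
    simp only [pvGroups, List.length_nil, List.range_zero, List.filter_nil, List.map_nil,
      pvChop, List.append_nil, List.drop_zero]
  | cons c rest ih =>
    intro acc
    rw [pvCuts_cons]
    have hpre : acc ++ c :: rest = (acc ++ [c]) ++ rest := by simp
    have hmap : (((List.range rest.length).filter (pvIsCut pl ex rest)).map (· + 1)).map
          (· + acc.length)
        = ((List.range rest.length).filter (pvIsCut pl ex rest)).map (· + (acc ++ [c]).length) := by
      rw [List.map_map]
      apply List.map_congr_left
      intro i _
      simp only [Function.comp_apply, List.length_append, List.length_cons, List.length_nil]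
      omega
    by_cases h : pvCutP pl ex c rest.head? = true
    · simp only [pvGroups, h, if_true, List.map_cons, List.cons_append,
        List.nil_append, pvChop, hmap]
      have hhead : pvSeg (acc ++ c :: rest) 0 (0 + acc.length + 1) = acc ++ [c] := by
        unfold pvSeg
        simp only [List.drop_zero, Nat.sub_zero, hpre]
        rw [List.take_append_of_le_length (by simp)]
        simp
      have htail : pvChop (acc ++ c :: rest)
            (((List.range rest.length).filter (pvIsCut pl ex rest)).map (· + (acc ++ [c]).length))
            (0 + acc.length + 1)
          = pvGroups pl ex [] rest := by
        rw [hpre]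
        have hs : 0 + acc.length + 1 = 0 + (acc ++ [c]).length := by simp
        rw [hs, pvChop_shift (acc ++ [c]) rest]
        rw [ih []]
        simp
      rw [hhead, htail]
    · simp only [pvGroups, h, if_false, Bool.false_eq_true, List.nil_append]
      rw [ih (acc ++ [c]), hpre, hmap]

-- ===== VERDICT (by name: the statement is the Claim_ definition above) =====
theorem cutByPattern_spec : Claim_equal_cutByPattern := by
  intro protein pl ex _
  unfold Spec_cutByPattern cutByPattern cutByPattern_alt
  rw [pvFold_eq_chop, pvGoA_eq_groups, pvGroups_eq_chop]
  simp
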